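-- pv_equiv track=rewrite | github.com/JamesShirk/compPhys | 2/assignment1/count6.py | psuedoRanSum
-- ===== SOURCE A (Python) =====
-- def psuedoRanSum(seed, m, n, p, q):
--     x0 = seed
--     x1 =  seed % p if seed % 2 == 0 else seed % q
--     x2 = 0
--     values = []
--     for _ in range(0, n):
--         x2 = (x1 + x0) % m
--         x1 = x2
--         x0 = x1
--         values.append(x2)
--     return values
-- ===== SOURCE B (Python) =====
-- def psuedoRanSum(seed, m, n, p, q):
--     x1 = seed % p if seed % 2 == 0 else seed % q
--     if n <= 0:
--         return []
--     v0 = (x1 + seed) % m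
--     return [(v0 * pow(2, k, m)) % m for k in range(n)]
-- ===== Notes on version B (the rewrite author's own statement) =====
-- stated objective: simpler
-- what changed: Replaces A's stateful three-variable recurrence loop with a closed-form per-index formula: element k is (v0 * pow(2, k, m)) % m where v0 = (x1 + seed) % m.
import Mathlib
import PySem

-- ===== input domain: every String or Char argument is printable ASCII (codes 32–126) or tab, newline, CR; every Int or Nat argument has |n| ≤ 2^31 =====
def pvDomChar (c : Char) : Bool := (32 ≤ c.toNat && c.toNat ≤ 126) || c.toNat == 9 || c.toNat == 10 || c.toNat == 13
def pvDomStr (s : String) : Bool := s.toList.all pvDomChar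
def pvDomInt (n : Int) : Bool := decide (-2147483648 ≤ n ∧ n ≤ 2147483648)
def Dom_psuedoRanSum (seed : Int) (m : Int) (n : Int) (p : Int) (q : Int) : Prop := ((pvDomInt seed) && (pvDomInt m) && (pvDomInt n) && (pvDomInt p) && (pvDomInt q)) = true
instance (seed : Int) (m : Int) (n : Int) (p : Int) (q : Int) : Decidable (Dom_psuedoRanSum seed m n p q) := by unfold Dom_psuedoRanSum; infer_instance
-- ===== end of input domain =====

-- B replaces A's stateful three-variable recurrence loop with a closed-form per-index
-- formula (element k is (v0 * pow(2, k, m)) % m): simpler to read; not faster.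


-- ===== PORT A =====
-- loop body: x2 = (x1 + x0) % m; x1 = x2; x0 = x1; values.append(x2)
def psuedoRanSumStep (m : Int) (st : Int × Int × List Int) (_ : Int) : Int × Int × List Int :=
  let x2 := PySem.Int.mod (st.2.1 + st.1) m
  (x2, x2, st.2.2 ++ [x2])

def psuedoRanSum (seed : Int) (m : Int) (n : Int) (p : Int) (q : Int) : List Int :=
  let x0 := seed
  let x1 := if PySem.Int.mod seed 2 = 0 then PySem.Int.mod seed p else PySem.Int.mod seed q
  ((PySem.List.pyRange 0 n 1).foldl (psuedoRanSumStep m) (x0, x1, [])).2.2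

-- ===== PORT B =====
def psuedoRanSum_alt (seed : Int) (m : Int) (n : Int) (p : Int) (q : Int) : List Int :=
  let x1 := if PySem.Int.mod seed 2 = 0 then PySem.Int.mod seed p else PySem.Int.mod seed q
  if n ≤ 0 then []
  else
    let v0 := PySem.Int.mod (x1 + seed) m
    -- pow(2, k, m) ported by hand as PySem.Int.mod (2 ^ k) m: Python's 3-arg pow
    -- equals (2 ** k) % m (result has the modulus's sign), exact for m ≠ 0
    (List.range n.toNat).map (fun k => PySem.Int.mod (v0 * PySem.Int.mod (2 ^ k) m) m)

-- ===== PRECONDITION & SPEC =====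
-- Pre_ excludes exactly the inputs where the Python A raises ZeroDivisionError:
-- a zero modulus p (resp. q) for even (resp. odd) seed, and m = 0 with n ≥ 1.
def Pre_psuedoRanSum (seed : Int) (m : Int) (n : Int) (p : Int) (q : Int) : Prop :=
  (if PySem.Int.mod seed 2 = 0 then p ≠ 0 else q ≠ 0) ∧ (0 < n → m ≠ 0)
instance (seed : Int) (m : Int) (n : Int) (p : Int) (q : Int) : Decidable (Pre_psuedoRanSum seed m n p q) := by unfold Pre_psuedoRanSum; infer_instance

def pvWitness_psuedoRanSum : Int × Int × Int × Int × Int := (2, 5, 3, 3, 7)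

def Spec_psuedoRanSum (seed : Int) (m : Int) (n : Int) (p : Int) (q : Int) (out : List Int) : Prop := out = psuedoRanSum_alt seed m n p q
instance (seed : Int) (m : Int) (n : Int) (p : Int) (q : Int) (out : List Int) : Decidable (Spec_psuedoRanSum seed m n p q out) := by unfold Spec_psuedoRanSum; infer_instance

-- ===== CLAIM (what is proved, stated in full; the proofs are below) =====
def Claim_equal_psuedoRanSum : Prop := ∀ (seed : Int) (m : Int) (n : Int) (p : Int) (q : Int), Dom_psuedoRanSum seed m n p q → Pre_psuedoRanSum seed m n p q → Spec_psuedoRanSum seed m n p q (psuedoRanSum seed m n p q)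

-- ===== LEMMAS AND PROOFS =====

theorem fmod_add_left (a b m : Int) : (a.fmod m + b).fmod m = (a + b).fmod m := by
  have h : a.fmod m + b = a + b + (-(a.fdiv m)) * m := by rw [Int.fmod_def]; ring
  rw [h, Int.add_mul_fmod_self_right]

theorem fmod_add_right (a b m : Int) : (a + b.fmod m).fmod m = (a + b).fmod m := by
  rw [add_comm a, fmod_add_left, add_comm]

theorem fmod_mul_right (a b m : Int) : (a * b.fmod m).fmod m = (a * b).fmod m := by
  have h : a * b.fmod m = a * b + (-(a * b.fdiv m)) * m := by rw [Int.fmod_def]; ring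
  rw [h, Int.add_mul_fmod_self_right]

-- one loop step sends f k to f (k+1), where f k = (v0 * 2^k).fmod m
theorem step_f (m v0 : Int) (k : Nat) (acc : List Int) (e : Int) :
    psuedoRanSumStep m ((v0 * 2 ^ k).fmod m, (v0 * 2 ^ k).fmod m, acc) e
      = ((v0 * 2 ^ (k + 1)).fmod m, (v0 * 2 ^ (k + 1)).fmod m,
          acc ++ [(v0 * 2 ^ (k + 1)).fmod m]) := by
  have h : PySem.Int.mod ((v0 * 2 ^ k).fmod m + (v0 * 2 ^ k).fmod m) m
      = (v0 * 2 ^ (k + 1)).fmod m := by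
    show ((v0 * 2 ^ k).fmod m + (v0 * 2 ^ k).fmod m).fmod m = _
    rw [fmod_add_left, fmod_add_right]
    ring_nf
  simp [psuedoRanSumStep, h]

-- the loop invariant, by induction on the (ignored) remaining range
theorem fold_inv (m v0 : Int) (l : List Int) : ∀ (k : Nat) (acc : List Int),
    l.foldl (psuedoRanSumStep m) ((v0 * 2 ^ k).fmod m, (v0 * 2 ^ k).fmod m, acc)
      = ((v0 * 2 ^ (k + l.length)).fmod m, (v0 * 2 ^ (k + l.length)).fmod m,
          acc ++ (List.range l.length).map (fun i => (v0 * 2 ^ (k + 1 + i)).fmod m)) := by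
  induction l with
  | nil => intro k acc; simp
  | cons e t ih =>
    intro k acc
    rw [List.foldl_cons, step_f, ih (k + 1)]
    simp only [Prod.mk.injEq, List.length_cons]
    refine ⟨?_, ?_, ?_⟩
    · ring_nf
    · ring_nf
    · simp only [List.range_succ_eq_map, List.map_cons, List.map_map,
        List.append_assoc, List.singleton_append]
      refine congrArg _ (congrArg _ (List.map_congr_left ?_))
      intro i _
      simp only [Function.comp_apply, Nat.succ_eq_add_one]
      ring_nf

theorem psuedoRanSum_eq (seed m n p q : Int) :
    psuedoRanSum seed m n p q = psuedoRanSum_alt seed m n p q := by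
  unfold psuedoRanSum psuedoRanSum_alt
  dsimp only
  set x1 := if PySem.Int.mod seed 2 = 0 then PySem.Int.mod seed p else PySem.Int.mod seed q with hx1
  by_cases hn : n ≤ 0
  · simp [PySem.List.pyRange_one_eq_nil hn, hn]
  · rw [Int.not_le] at hn
    rw [if_neg (by omega)]
    rw [PySem.List.pyRange_one_cons hn, List.foldl_cons]
    set v0 := PySem.Int.mod (x1 + seed) m with hv0
    simp only [PySem.Int.mod, fmod_mul_right]
    have hstep1 : psuedoRanSumStep m (seed, x1, []) 0 = (v0, v0, [v0]) := by
      simp [psuedoRanSumStep, hv0]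
    rw [hstep1]
    have hv0f : v0 = (v0 * 2 ^ 0).fmod m := by
      show v0 = (v0 * 1).fmod m
      rw [mul_one, hv0]
      show v0 = (PySem.Int.mod (x1 + seed) m).fmod m
      show v0 = ((x1 + seed).fmod m).fmod m
      rw [Int.fmod_fmod_of_dvd _ dvd_rfl, hv0]; rfl
    conv_lhs => rw [hv0f]
    rw [fold_inv]
    have hlen : (PySem.List.pyRange 1 n 1).length = (n - 1).toNat := by
      simp [PySem.List.length_pyRange_one 1 n]
    have hnt : n.toNat = (n - 1).toNat + 1 := by omega
    simp only [zero_add, hlen]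
    rw [hnt, List.range_succ_eq_map]
    simp only [List.map_cons, List.map_map, List.singleton_append, pow_zero, mul_one]
    refine congrArg₂ List.cons rfl (List.map_congr_left ?_)
    intro i _
    simp only [Function.comp_apply, pow_succ]
    ring_nf

-- ===== VERDICT (by name: the statement is the Claim_ definition above) =====
theorem psuedoRanSum_spec : Claim_equal_psuedoRanSum := by
  intro seed m n p q _ _
  unfold Spec_psuedoRanSum
  exact psuedoRanSum_eq seed m n p q
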